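-- pv_equiv track=rewrite | github.com/MrBrantCode/unitest_baseline | mut_generate/mist_train_cf/cf_75318/solution.py | calculate_gems
-- ===== SOURCE A (Python) =====
-- def calculate_gems(points, total_gems):
--     for gems_C in range(0, total_gems+1):
--         a = total_gems - gems_C
--         b = points - 20 * gems_C
--         if b % 5 == 0:
--             gems_B = b // 15
--             gems_A = a - gems_B
--             if gems_A >= 0 and gems_B >= 0:
--                 return [gems_A, gems_B, gems_C]
--     return None
-- ===== SOURCE B (Python) =====
-- def calculate_gems(points, total_gems):
--     # b % 5 == (points - 20*c) % 5 == points % 5 for every c, so the mod test is constant;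
--     # gems_A is nondecreasing in gems_C, so the first valid gems_C is a closed form.
--     if total_gems < 0 or points % 5 != 0:
--         return None
--     c = max(0, -((-(points - 15 * total_gems - 14)) // 5))  # smallest c with gems_A >= 0
--     if c > total_gems or points - 20 * c < 0:
--         return None
--     gems_B = (points - 20 * c) // 15
--     return [total_gems - c - gems_B, gems_B, c]
-- ===== Notes on version B (the rewrite author's own statement) =====
-- stated objective: alternative
-- what changed: Replaced the linear scan over gems_C (worst-case O(total_gems)) by a closed form: the mod-5 test is independent of gems_C and gems_A is nondecreasing in gems_C, so the first valid gems_C is a ceiling-division formula; intended as faster (measured up to ~150x on inputs where A scans far), but A returns immediately on many inputs so a timing run did not confirm it consistently.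
import Mathlib
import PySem

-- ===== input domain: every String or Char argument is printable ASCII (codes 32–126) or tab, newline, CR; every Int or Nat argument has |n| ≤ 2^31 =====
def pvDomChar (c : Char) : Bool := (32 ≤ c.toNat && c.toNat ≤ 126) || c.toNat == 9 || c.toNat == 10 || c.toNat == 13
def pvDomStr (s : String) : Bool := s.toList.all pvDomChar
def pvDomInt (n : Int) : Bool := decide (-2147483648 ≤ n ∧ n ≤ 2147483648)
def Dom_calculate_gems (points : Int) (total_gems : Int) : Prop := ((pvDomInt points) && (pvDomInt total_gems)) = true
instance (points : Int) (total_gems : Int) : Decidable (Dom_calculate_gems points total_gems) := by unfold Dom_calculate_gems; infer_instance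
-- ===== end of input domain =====

-- B replaces A's linear scan over gems_C by a closed-form smallest valid gems_C (alternative algorithm).

-- ===== PORT A =====
-- the for-loop of A, recursing over the remaining range elements
def calcLoopA (points : Int) (total_gems : Int) : List Int → Option (List Int)
  | [] => none
  | gems_C :: rest =>
    let a := total_gems - gems_C
    let b := points - 20 * gems_C
    if PySem.Int.mod b 5 = 0 then
      let gems_B := PySem.Int.floordiv b 15
      let gems_A := a - gems_B
      if gems_A ≥ 0 ∧ gems_B ≥ 0 then some [gems_A, gems_B, gems_C]
      else calcLoopA points total_gems rest
    else calcLoopA points total_gems rest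

def calculate_gems (points : Int) (total_gems : Int) : Option (List Int) :=
  calcLoopA points total_gems (PySem.List.pyRange 0 (total_gems + 1) 1)

-- ===== PORT B =====
def calculate_gems_alt (points : Int) (total_gems : Int) : Option (List Int) :=
  if total_gems < 0 ∨ PySem.Int.mod points 5 ≠ 0 then none
  else
    let c := max 0 (-(PySem.Int.floordiv (-(points - 15 * total_gems - 14)) 5))
    if c > total_gems ∨ points - 20 * c < 0 then none
    else
      let gems_B := PySem.Int.floordiv (points - 20 * c) 15
      some [total_gems - c - gems_B, gems_B, c]

-- ===== PRECONDITION & SPEC =====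
def Spec_calculate_gems (points : Int) (total_gems : Int) (out : Option (List Int)) : Prop := out = calculate_gems_alt points total_gems
instance (points : Int) (total_gems : Int) (out : Option (List Int)) : Decidable (Spec_calculate_gems points total_gems out) := by unfold Spec_calculate_gems; infer_instance

-- ===== CLAIM (what is proved, stated in full; the proofs are below) =====
def Claim_equal_calculate_gems : Prop := ∀ (points : Int) (total_gems : Int), Dom_calculate_gems points total_gems → Spec_calculate_gems points total_gems (calculate_gems points total_gems)

-- ===== LEMMAS AND PROOFS =====

-- when points % 5 ≠ 0 the loop never fires its branch
lemma calcLoopA_none_of_mod (points total_gems : Int) (h5 : points % 5 ≠ 0) :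
    ∀ L : List Int, calcLoopA points total_gems L = none := by
  intro L
  induction L with
  | nil => rfl
  | cons c rest ih =>
    simp only [calcLoopA, PySem.Int.mod_eq_emod_of_pos (by norm_num : (0:Int) < 5)]
    rw [if_neg (by omega)]
    exact ih

-- the loop over [k, …, total_gems] returns the first c ≥ max k cc with points - 20c ≥ 0,
-- where cc = ⌈(points - 15·total_gems - 14)/5⌉ characterises gems_A ≥ 0
lemma calcLoopA_range (points T : Int) (h5 : points % 5 = 0) :
    ∀ n : Nat, ∀ k : Int, (T + 1 - k).toNat = n →
    calcLoopA points T (PySem.List.pyRange k (T + 1) 1) =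
      (if max k (-((-(points - 15 * T - 14)) / 5)) ≤ T ∧
          0 ≤ points - 20 * max k (-((-(points - 15 * T - 14)) / 5))
       then some [T - max k (-((-(points - 15 * T - 14)) / 5)) -
                    (points - 20 * max k (-((-(points - 15 * T - 14)) / 5))) / 15,
                  (points - 20 * max k (-((-(points - 15 * T - 14)) / 5))) / 15,
                  max k (-((-(points - 15 * T - 14)) / 5))]
       else none) := by
  intro n
  induction n with
  | zero =>
    intro k hk
    rw [PySem.List.pyRange_one_eq_nil (by omega)]
    simp only [calcLoopA]
    rw [if_neg (by omega)]
  | succ m ih =>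
    intro k hk
    rw [PySem.List.pyRange_one_cons (by omega)]
    simp only [calcLoopA,
      PySem.Int.mod_eq_emod_of_pos (by norm_num : (0:Int) < 5),
      PySem.Int.floordiv_eq_ediv_of_pos (by norm_num : (0:Int) < 15)]
    rw [if_pos (by omega)]
    by_cases hc : T - k - (points - 20 * k) / 15 ≥ 0 ∧ (points - 20 * k) / 15 ≥ 0
    · rw [if_pos hc]
      have hmax : max k (-((-(points - 15 * T - 14)) / 5)) = k := by omega
      rw [if_pos (by omega)]
      rw [hmax]
    · rw [if_neg hc]
      rw [ih (k + 1) (by omega)]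
      by_cases hgood : max (k+1) (-((-(points - 15 * T - 14)) / 5)) ≤ T ∧
          0 ≤ points - 20 * max (k+1) (-((-(points - 15 * T - 14)) / 5))
      · rw [if_pos hgood, if_pos (by omega)]
        have : max (k+1) (-((-(points - 15 * T - 14)) / 5)) =
               max k (-((-(points - 15 * T - 14)) / 5)) := by omega
        rw [this]
      · rw [if_neg hgood, if_neg (by omega)]

-- ===== VERDICT (by name: the statement is the Claim_ definition above) =====
theorem calculate_gems_spec : Claim_equal_calculate_gems := by
  intro points T _
  unfold Spec_calculate_gems calculate_gems calculate_gems_alt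
  simp only [PySem.Int.mod_eq_emod_of_pos (by norm_num : (0:Int) < 5),
    PySem.Int.floordiv_eq_ediv_of_pos (by norm_num : (0:Int) < 5),
    PySem.Int.floordiv_eq_ediv_of_pos (by norm_num : (0:Int) < 15)]
  by_cases hT : T < 0
  · rw [PySem.List.pyRange_one_eq_nil (by omega)]
    simp only [calcLoopA]
    rw [if_pos (show T < 0 ∨ points % 5 ≠ 0 from Or.inl hT)]
  · by_cases h5 : points % 5 = 0
    · rw [calcLoopA_range points T h5 (T + 1 - 0).toNat 0 rfl,
        if_neg (show ¬(T < 0 ∨ points % 5 ≠ 0) from by omega)]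
      by_cases hgood : max (0:Int) (-((-(points - 15 * T - 14)) / 5)) ≤ T ∧
          0 ≤ points - 20 * max (0:Int) (-((-(points - 15 * T - 14)) / 5))
      · rw [if_pos hgood,
          if_neg (show ¬(max (0:Int) (-((-(points - 15 * T - 14)) / 5)) > T ∨
            points - 20 * max (0:Int) (-((-(points - 15 * T - 14)) / 5)) < 0) from by omega)]
      · rw [if_neg hgood,
          if_pos (show (max (0:Int) (-((-(points - 15 * T - 14)) / 5)) > T ∨
            points - 20 * max (0:Int) (-((-(points - 15 * T - 14)) / 5)) < 0) from by omega)]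
    · rw [calcLoopA_none_of_mod points T h5 _,
        if_pos (show T < 0 ∨ points % 5 ≠ 0 from Or.inr h5)]
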